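-- pv_equiv track=rewrite | github.com/lenzwagner/columngeneration_consistency | Utils/aggundercover.py | create_dict_from_list
-- ===== SOURCE A (Python) =====
-- def create_dict_from_list(lst, days, shifts):
--     if len(lst) != days * shifts:
--         raise ValueError("Error")
--
--     result = {}
--     index = 0
--
--     for i in range(1, days + 1):
--         for j in range(1, shifts + 1):
--             result[(i, j)] = lst[index]
--             index += 1
--
--     return result
-- ===== SOURCE B (Python) =====
-- def create_dict_from_list(lst, days, shifts):
--     if len(lst) != days * shifts:
--         raise ValueError("Error")
--
--     result = {}
--     for idx, val in enumerate(lst):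
--         i, j = divmod(idx, shifts)
--         result[(i + 1, j + 1)] = val
--     return result
-- ===== Notes on version B (the rewrite author's own statement) =====
-- stated objective: simpler
-- what changed: Replaces the nested day/shift range loops with a manual index counter by a single pass over enumerate(lst), deriving each (day,shift) key from the flat position via divmod.
-- outside the precondition, e.g. on create_dict_from_list([5], -1, -1): A returns {}, B returns {(1, 1): 5}
import Mathlib
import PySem

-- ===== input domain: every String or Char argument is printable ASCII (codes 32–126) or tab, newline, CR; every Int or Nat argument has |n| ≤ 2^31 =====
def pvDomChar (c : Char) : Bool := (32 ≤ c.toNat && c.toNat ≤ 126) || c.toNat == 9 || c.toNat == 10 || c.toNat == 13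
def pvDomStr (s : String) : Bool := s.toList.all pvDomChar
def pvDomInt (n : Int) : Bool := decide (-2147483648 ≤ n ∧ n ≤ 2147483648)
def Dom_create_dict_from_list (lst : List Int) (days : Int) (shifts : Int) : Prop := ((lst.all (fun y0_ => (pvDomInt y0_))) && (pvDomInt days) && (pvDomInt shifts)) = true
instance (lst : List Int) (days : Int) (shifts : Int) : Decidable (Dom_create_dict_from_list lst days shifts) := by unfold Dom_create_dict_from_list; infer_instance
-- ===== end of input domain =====

-- B replaces A's nested day/shift loops with a manual index counter by one pass
-- over enumerate(lst), computing each (day,shift) key from the flat position via divmod (objective: simpler).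


-- ===== PORT A =====
-- literal port of A: the length guard (raise ValueError → outside Pre_, stand-in []),
-- then nested loops 'for i in range(1, days+1): for j in range(1, shifts+1)' carrying
-- the dict and the manual index counter as the fold state; 'return result' as items.
def create_dict_from_list (lst : List Int) (days : Int) (shifts : Int) : List (Int × Int × Int) :=
  if (lst.length : Int) ≠ days * shifts then []  -- raise ValueError("Error"): outside Pre_
  else
    let st := (PySem.List.pyRange 1 (days + 1) 1).foldl
      (fun (st : PySem.Dict (Int × Int) Int × Int) i =>
        (PySem.List.pyRange 1 (shifts + 1) 1).foldl
          (fun st j => (st.1.insert (i, j) (PySem.List.pyGetD lst st.2 0), st.2 + 1)) st)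
      (PySem.Dict.empty, 0)
    st.1.items.map (fun p => (p.1.1, p.1.2, p.2))

-- ===== PORT B =====
-- literal port of Source B: the same guard, then one fold over enumerate(lst),
-- key (i+1, j+1) with (i, j) = divmod(idx, shifts).
def create_dict_from_list_alt (lst : List Int) (days : Int) (shifts : Int) : List (Int × Int × Int) :=
  if (lst.length : Int) ≠ days * shifts then []  -- raise ValueError("Error"): outside Pre_
  else
    let d := (PySem.List.enumerate lst 0).foldl
      (fun (d : PySem.Dict (Int × Int) Int) p =>
        let dm := (PySem.Int.divmod? p.1 shifts).getD (0, 0)  -- shifts = 0 → lst = [] inside Pre_: unreached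
        d.insert (dm.1 + 1, dm.2 + 1) p.2)
      PySem.Dict.empty
    d.items.map (fun p => (p.1.1, p.1.2, p.2))

-- ===== PRECONDITION & SPEC =====
-- Pre_ excludes (a) mismatched lengths, where A raises ValueError, and (b) nonempty lst with
-- negative days and shifts (e.g. ([5], -1, -1)): there A returns {} silently ignoring the list,
-- an accidental corner of empty range() where neither value is specified.
def Pre_create_dict_from_list (lst : List Int) (days : Int) (shifts : Int) : Prop :=
  (lst.length : Int) = days * shifts ∧ (0 ≤ days ∧ 0 ≤ shifts ∨ lst = [])
instance (lst : List Int) (days : Int) (shifts : Int) : Decidable (Pre_create_dict_from_list lst days shifts) := by unfold Pre_create_dict_from_list; infer_instance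
def pvWitness_create_dict_from_list : List Int × Int × Int := ([10, 20, 30, 40, 50, 60], 2, 3)

def Spec_create_dict_from_list (lst : List Int) (days : Int) (shifts : Int) (out : List (Int × Int × Int)) : Prop := out = create_dict_from_list_alt lst days shifts
instance (lst : List Int) (days : Int) (shifts : Int) (out : List (Int × Int × Int)) : Decidable (Spec_create_dict_from_list lst days shifts out) := by unfold Spec_create_dict_from_list; infer_instance

-- ===== CLAIM (what is proved, stated in full; the proofs are below) =====
def Claim_equal_create_dict_from_list : Prop := ∀ (lst : List Int) (days : Int) (shifts : Int), Dom_create_dict_from_list lst days shifts → Pre_create_dict_from_list lst days shifts → Spec_create_dict_from_list lst days shifts (create_dict_from_list lst days shifts)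

-- ===== LEMMAS AND PROOFS =====

-- the canonical (key, value) pair list both folds insert, positions 0..n-1 of lst
def pvPairs (lst : List Int) (S : Nat) (n : Nat) : List ((Int × Int) × Int) :=
  (List.range n).map (fun k =>
    (((1 + ((k / S : Nat) : Int), 1 + ((k % S : Nat) : Int)) : Int × Int),
     PySem.List.pyGetD lst (k : Int) 0))

-- B's fold equals the fold of pvPairs
lemma pv_B_fold (lst : List Int) (S : Nat) (hS : 0 < S ∨ lst = []) :
    (PySem.List.enumerate lst 0).foldl
      (fun (d : PySem.Dict (Int × Int) Int) p =>
        let dm := (PySem.Int.divmod? p.1 (S : Int)).getD (0, 0)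
        d.insert (dm.1 + 1, dm.2 + 1) p.2)
      PySem.Dict.empty
    = (pvPairs lst S lst.length).foldl (fun d p => d.insert p.1 p.2) PySem.Dict.empty := by
  rcases hS with hpos | rfl
  · rw [PySem.List.enumerate_eq_map_pyRange lst 0, PySem.List.len_eq,
      PySem.List.pyRange_zero_nat, pvPairs, List.foldl_map, List.foldl_map, List.foldl_map]
    refine PySem.List.foldl_congr_mem _ _ _ _ (fun d k _ => ?_)
    simp [PySem.Int.divmod?, hpos.ne', Int.fdiv_eq_ediv, Int.fmod_eq_emod, add_comm]
  · rfl

-- one inner row of A: fold over j = 1..shifts from state (d, idx)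
lemma pv_A_row (lst : List Int) (S : Nat) (i : Int) :
    ∀ (d : PySem.Dict (Int × Int) Int) (idx : Int),
    (PySem.List.pyRange 1 ((S : Int) + 1) 1).foldl
      (fun (st : PySem.Dict (Int × Int) Int × Int) j =>
        (st.1.insert (i, j) (PySem.List.pyGetD lst st.2 0), st.2 + 1)) (d, idx)
    = ((List.range S).foldl
        (fun d' j => d'.insert (i, 1 + (j : Int)) (PySem.List.pyGetD lst (idx + (j : Int)) 0)) d,
       idx + (S : Int)) := by
  induction S with
  | zero =>
    intro d idx
    simp [PySem.List.pyRange_one_eq_nil (le_refl (1 : Int))]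
  | succ S ih =>
    intro d idx
    have hcast : ((S + 1 : Nat) : Int) + 1 = ((S : Int) + 1) + 1 := by push_cast; ring
    rw [hcast, PySem.List.pyRange_one_succ_right (show (1:Int) ≤ (S:Int)+1 by omega), List.foldl_append, ih,
        List.range_succ, List.foldl_append]
    simp only [List.foldl_cons, List.foldl_nil]
    rw [show (1 : Int) + (S : Int) = (S : Int) + 1 by ring]
    push_cast
    rw [add_assoc]

-- A's nested fold equals the fold of pvPairs, with the final index D*S
lemma pv_A_fold (lst : List Int) (S : Nat) :
    ∀ (D : Nat),
    (PySem.List.pyRange 1 ((D : Int) + 1) 1).foldl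
      (fun (st : PySem.Dict (Int × Int) Int × Int) i =>
        (PySem.List.pyRange 1 ((S : Int) + 1) 1).foldl
          (fun st j => (st.1.insert (i, j) (PySem.List.pyGetD lst st.2 0), st.2 + 1)) st)
      (PySem.Dict.empty, 0)
    = ((pvPairs lst S (D * S)).foldl (fun d p => d.insert p.1 p.2) PySem.Dict.empty,
       ((D * S : Nat) : Int)) := by
  intro D
  induction D with
  | zero =>
    simp [PySem.List.pyRange_one_eq_nil (le_refl (1 : Int)), pvPairs]
  | succ D ih =>
    have hcast : ((D + 1 : Nat) : Int) + 1 = ((D : Int) + 1) + 1 := by push_cast; ring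
    rw [hcast, PySem.List.pyRange_one_succ_right (show (1:Int) ≤ (D:Int)+1 by omega), List.foldl_append, ih]
    simp only [List.foldl_cons, List.foldl_nil]
    rw [pv_A_row]
    have hsplit : (D + 1) * S = D * S + S := by ring
    rw [hsplit]
    rw [Prod.mk.injEq]
    refine ⟨?_, ?_⟩
    case _ =>
      simp only [pvPairs]
      rw [List.range_add, List.map_append, List.foldl_append, List.map_map]
      simp only [List.foldl_map, Function.comp]
      refine PySem.List.foldl_congr_mem _ _ _ _ (fun d j hj => ?_)
      rw [List.mem_range] at hj
      have hS : 0 < S := by omega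
      have h1 : (D * S + j) / S = D := by
        rw [Nat.mul_comm D S, Nat.mul_add_div hS, Nat.div_eq_of_lt hj, Nat.add_zero]
      have h2 : (D * S + j) % S = j := by
        rw [Nat.mul_comm D S, Nat.mul_add_mod, Nat.mod_eq_of_lt hj]
      simp only [h1, h2]
      push_cast
      rw [add_comm (1 : Int) (D : Int)]
    case _ => push_cast; ring

-- ===== VERDICT (by name: the statement is the Claim_ definition above) =====
theorem create_dict_from_list_spec : Claim_equal_create_dict_from_list := by
  intro lst days shifts _ hpre
  obtain ⟨hlen, hds | hnil⟩ := hpre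
  · obtain ⟨hd, hs⟩ := hds
    unfold Spec_create_dict_from_list create_dict_from_list create_dict_from_list_alt
    rw [if_neg (fun h => h hlen), if_neg (fun h => h hlen)]
    obtain ⟨D, rfl⟩ : ∃ D : Nat, days = (D : Int) := ⟨days.toNat, (Int.toNat_of_nonneg hd).symm⟩
    obtain ⟨S, rfl⟩ : ∃ S : Nat, shifts = (S : Int) := ⟨shifts.toNat, (Int.toNat_of_nonneg hs).symm⟩
    have hlenN : lst.length = D * S := by exact_mod_cast hlen
    have hS : 0 < S ∨ lst = [] := by
      rcases Nat.eq_zero_or_pos S with h0 | hpos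
      · exact Or.inr (List.eq_nil_of_length_eq_zero (by simpa [h0] using hlenN))
      · exact Or.inl hpos
    rw [pv_A_fold lst S D, pv_B_fold lst S hS, hlenN]
  · -- lst = []: days * shifts = 0, so one of the two ranges is empty and both sides are {}
    subst hnil
    unfold Spec_create_dict_from_list create_dict_from_list create_dict_from_list_alt
    rw [if_neg (fun h => h hlen), if_neg (fun h => h hlen)]
    simp only [PySem.List.enumerate_nil, List.foldl_nil]
    have hlen0 : days * shifts = 0 := by simpa using hlen.symm
    rcases (by omega : days ≤ 0 ∨ 0 < days) with hd0 | hd0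
    · rw [PySem.List.pyRange_one_eq_nil (show days + 1 ≤ 1 by omega)]
      simp
    · have hs0 : shifts = 0 := by
        rcases mul_eq_zero.mp hlen0 with h | h
        · omega
        · exact h
      rw [hs0]
      have hrow : PySem.List.pyRange 1 ((0 : Int) + 1) 1 = [] := by decide
      rw [hrow]
      simp
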